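-- pv_equiv track=rewrite | github.com/wuTims/ban-teemo | scripts/analyze_recommendations.py | get_role_grouped_recommendations
-- ===== SOURCE A (Python) =====
-- def get_role_grouped_recommendations(picks: list[dict], top_n: int = 2) -> dict[str, list[dict]]:
--     """Group recommendations by role and return top N per role.
--
--     Args:
--         picks: List of pick recommendation dicts with 'role' field
--         top_n: Number of recommendations per role (default 2)
--
--     Returns:
--         Dict mapping role -> list of top N recommendations for that role
--     """
--     ROLES = ["top", "jungle", "mid", "bot", "support"]
--     role_grouped: dict[str, list[dict]] = {role: [] for role in ROLES}
--
--     for rec in picks: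
--         role = rec.get("role")
--         if role and role.lower() in ROLES:
--             role_key = role.lower()
--             if len(role_grouped[role_key]) < top_n:
--                 role_grouped[role_key].append(rec)
--
--     return role_grouped
-- ===== SOURCE B (Python) =====
-- def get_role_grouped_recommendations(picks: list[dict], top_n: int = 2) -> dict[str, list[dict]]:
--     """Group recommendations by role and return top N per role."""
--     limit = max(top_n, 0)
--     return {
--         role: [rec for rec in picks
--                if (r := rec.get("role")) and r.lower() == role][:limit]
--         for role in ["top", "jungle", "mid", "bot", "support"]
--     }
-- ===== Notes on version B (the rewrite author's own statement) =====
-- stated objective: simpler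
-- what changed: A fills five mutable buckets in one pass with an in-loop len<top_n cap; B builds the result as a per-role dict comprehension that filters picks for each role and truncates to max(top_n,0) with a slice.
import Mathlib
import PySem

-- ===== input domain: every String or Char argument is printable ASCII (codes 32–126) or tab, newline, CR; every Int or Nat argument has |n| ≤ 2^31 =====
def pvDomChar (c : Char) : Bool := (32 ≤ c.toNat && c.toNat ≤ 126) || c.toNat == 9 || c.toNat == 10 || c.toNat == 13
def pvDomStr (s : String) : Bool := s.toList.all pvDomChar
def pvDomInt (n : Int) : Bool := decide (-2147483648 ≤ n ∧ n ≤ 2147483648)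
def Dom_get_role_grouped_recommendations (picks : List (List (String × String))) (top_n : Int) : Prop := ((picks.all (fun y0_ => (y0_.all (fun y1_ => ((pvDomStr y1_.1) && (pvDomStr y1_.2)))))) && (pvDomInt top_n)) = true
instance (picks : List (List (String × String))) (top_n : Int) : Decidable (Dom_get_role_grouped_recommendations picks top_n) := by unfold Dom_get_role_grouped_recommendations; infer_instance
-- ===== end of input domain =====

-- B replaces A's capped one-pass bucket fill with a per-role dict comprehension
-- (filter-then-truncate); objective: simpler/alternative decomposition, same cost.

-- ===== PORT A =====
def pvRoles : List String := ["top", "jungle", "mid", "bot", "support"]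

-- rec.get("role"): first-match lookup — exact for a Python dict modelled as an assoc list
def pvGetRole : List (String × String) → Option String
  | [] => none
  | (k, v) :: rest => if k == "role" then some v else pvGetRole rest

-- the body of A's for-loop (role_grouped[role_key].append(rec) = modify at the key)
def pvStepA (top_n : Int) (d : PySem.Dict String (List (List (String × String))))
    (rec : List (String × String)) : PySem.Dict String (List (List (String × String))) :=
  match pvGetRole rec with
  | none => d
  | some role =>
    if (!(role == "")) && pvRoles.contains (PySem.Str.lower role) then
      let key := PySem.Str.lower role
      if ((d.getD key []).length : Int) < top_n then
        d.modify key [] (fun l => l ++ [rec])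
      else d
    else d

def get_role_grouped_recommendations (picks : List (List (String × String))) (top_n : Int) :
    List (String × List (List (String × String))) :=
  let init := pvRoles.foldl (fun d role => d.insert role []) PySem.Dict.empty
  (picks.foldl (pvStepA top_n) init).items

-- ===== PORT B =====
-- B's comprehension filter: (r := rec.get("role")) and r.lower() == role
def pvMatches (role : String) (rec : List (String × String)) : Bool :=
  match pvGetRole rec with
  | none => false
  | some r => (!(r == "")) && (PySem.Str.lower r == role)

def get_role_grouped_recommendations_alt (picks : List (List (String × String))) (top_n : Int) :
    List (String × List (List (String × String))) :=
  let limit := max top_n 0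
  pvRoles.map (fun role => (role, (picks.filter (pvMatches role)).take limit.toNat))

-- ===== PRECONDITION & SPEC =====
def Spec_get_role_grouped_recommendations (picks : List (List (String × String))) (top_n : Int) (out : List (String × List (List (String × String)))) : Prop := out = get_role_grouped_recommendations_alt picks top_n
instance (picks : List (List (String × String))) (top_n : Int) (out : List (String × List (List (String × String)))) : Decidable (Spec_get_role_grouped_recommendations picks top_n out) := by unfold Spec_get_role_grouped_recommendations; infer_instance

-- ===== CLAIM (what is proved, stated in full; the proofs are below) =====
def Claim_equal_get_role_grouped_recommendations : Prop := ∀ (picks : List (List (String × String))) (top_n : Int), Dom_get_role_grouped_recommendations picks top_n → Spec_get_role_grouped_recommendations picks top_n (get_role_grouped_recommendations picks top_n)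

-- ===== LEMMAS AND PROOFS =====

-- loop invariant: from any 5-bucket state, A's fold appends to each bucket the first
-- (top_n - already-there) picks matching that role
theorem pv_fold_inv (top_n : Int) (picks : List (List (String × String)))
    (t j m b s : List (List (String × String))) :
    picks.foldl (pvStepA top_n)
      (PySem.Dict.mk [("top", t), ("jungle", j), ("mid", m), ("bot", b), ("support", s)]) =
    PySem.Dict.mk
      [("top",     t ++ (picks.filter (pvMatches "top")).take (top_n.toNat - t.length)),
       ("jungle",  j ++ (picks.filter (pvMatches "jungle")).take (top_n.toNat - j.length)),
       ("mid",     m ++ (picks.filter (pvMatches "mid")).take (top_n.toNat - m.length)),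
       ("bot",     b ++ (picks.filter (pvMatches "bot")).take (top_n.toNat - b.length)),
       ("support", s ++ (picks.filter (pvMatches "support")).take (top_n.toNat - s.length))] := by
  induction picks generalizing t j m b s with
  | nil => simp
  | cons rec rest ih =>
    simp only [List.foldl_cons]
    cases hr : pvGetRole rec with
    | none =>
      have hstep : pvStepA top_n (PySem.Dict.mk [("top", t), ("jungle", j), ("mid", m), ("bot", b), ("support", s)]) rec = PySem.Dict.mk [("top", t), ("jungle", j), ("mid", m), ("bot", b), ("support", s)] := by
        simp [pvStepA, hr]
      rw [hstep, ih]
      simp [pvMatches, hr, List.filter_cons]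
    | some r =>
      by_cases hr0 : r = ""
      · subst hr0
        have hstep : pvStepA top_n (PySem.Dict.mk [("top", t), ("jungle", j), ("mid", m), ("bot", b), ("support", s)]) rec = PySem.Dict.mk [("top", t), ("jungle", j), ("mid", m), ("bot", b), ("support", s)] := by
          simp [pvStepA, hr]
        rw [hstep, ih]
        simp [pvMatches, hr, List.filter_cons]
      · by_cases h1 : PySem.Str.lower r = "top"
        · have hm0 : pvMatches "top" rec = true := by simp [pvMatches, hr, h1, hr0]
          have hm1 : pvMatches "jungle" rec = false := by simp [pvMatches, hr, h1, hr0]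
          have hm2 : pvMatches "mid" rec = false := by simp [pvMatches, hr, h1, hr0]
          have hm3 : pvMatches "bot" rec = false := by simp [pvMatches, hr, h1, hr0]
          have hm4 : pvMatches "support" rec = false := by simp [pvMatches, hr, h1, hr0]
          by_cases hc : (((t.length : Nat) : Int)) < top_n
          · rw [show pvStepA top_n (PySem.Dict.mk [("top", t), ("jungle", j), ("mid", m), ("bot", b), ("support", s)]) rec = PySem.Dict.mk [("top", t ++ [rec]), ("jungle", j), ("mid", m), ("bot", b), ("support", s)] from by
              simp [pvStepA, hr, hr0, h1, pvRoles, hc, PySem.Dict.modify, PySem.Dict.getD, PySem.Dict.get?, PySem.Dict.insert], ih]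
            simp [List.filter_cons, hm0, hm1, hm2, hm3, hm4]
            rw [show top_n.toNat - t.length = (top_n.toNat - (t.length + 1)) + 1 from by omega, List.take_succ_cons]
          · rw [show pvStepA top_n (PySem.Dict.mk [("top", t), ("jungle", j), ("mid", m), ("bot", b), ("support", s)]) rec = PySem.Dict.mk [("top", t), ("jungle", j), ("mid", m), ("bot", b), ("support", s)] from by
              simp [pvStepA, hr, hr0, h1, pvRoles, hc, PySem.Dict.getD, PySem.Dict.get?], ih]
            have h0 : top_n.toNat - t.length = 0 := by omega
            simp [List.filter_cons, hm0, hm1, hm2, hm3, hm4, h0]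
        ·
          by_cases h2 : PySem.Str.lower r = "jungle"
          · have hm0 : pvMatches "top" rec = false := by simp [pvMatches, hr, h2, hr0]
            have hm1 : pvMatches "jungle" rec = true := by simp [pvMatches, hr, h2, hr0]
            have hm2 : pvMatches "mid" rec = false := by simp [pvMatches, hr, h2, hr0]
            have hm3 : pvMatches "bot" rec = false := by simp [pvMatches, hr, h2, hr0]
            have hm4 : pvMatches "support" rec = false := by simp [pvMatches, hr, h2, hr0]
            by_cases hc : (((j.length : Nat) : Int)) < top_n
            · rw [show pvStepA top_n (PySem.Dict.mk [("top", t), ("jungle", j), ("mid", m), ("bot", b), ("support", s)]) rec = PySem.Dict.mk [("top", t), ("jungle", j ++ [rec]), ("mid", m), ("bot", b), ("support", s)] from by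
                simp [pvStepA, hr, hr0, h2, pvRoles, hc, PySem.Dict.modify, PySem.Dict.getD, PySem.Dict.get?, PySem.Dict.insert], ih]
              simp [List.filter_cons, hm0, hm1, hm2, hm3, hm4]
              rw [show top_n.toNat - j.length = (top_n.toNat - (j.length + 1)) + 1 from by omega, List.take_succ_cons]
            · rw [show pvStepA top_n (PySem.Dict.mk [("top", t), ("jungle", j), ("mid", m), ("bot", b), ("support", s)]) rec = PySem.Dict.mk [("top", t), ("jungle", j), ("mid", m), ("bot", b), ("support", s)] from by
                simp [pvStepA, hr, hr0, h2, pvRoles, hc, PySem.Dict.getD, PySem.Dict.get?], ih]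
              have h0 : top_n.toNat - j.length = 0 := by omega
              simp [List.filter_cons, hm0, hm1, hm2, hm3, hm4, h0]
          ·
            by_cases h3 : PySem.Str.lower r = "mid"
            · have hm0 : pvMatches "top" rec = false := by simp [pvMatches, hr, h3, hr0]
              have hm1 : pvMatches "jungle" rec = false := by simp [pvMatches, hr, h3, hr0]
              have hm2 : pvMatches "mid" rec = true := by simp [pvMatches, hr, h3, hr0]
              have hm3 : pvMatches "bot" rec = false := by simp [pvMatches, hr, h3, hr0]
              have hm4 : pvMatches "support" rec = false := by simp [pvMatches, hr, h3, hr0]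
              by_cases hc : (((m.length : Nat) : Int)) < top_n
              · rw [show pvStepA top_n (PySem.Dict.mk [("top", t), ("jungle", j), ("mid", m), ("bot", b), ("support", s)]) rec = PySem.Dict.mk [("top", t), ("jungle", j), ("mid", m ++ [rec]), ("bot", b), ("support", s)] from by
                  simp [pvStepA, hr, hr0, h3, pvRoles, hc, PySem.Dict.modify, PySem.Dict.getD, PySem.Dict.get?, PySem.Dict.insert], ih]
                simp [List.filter_cons, hm0, hm1, hm2, hm3, hm4]
                rw [show top_n.toNat - m.length = (top_n.toNat - (m.length + 1)) + 1 from by omega, List.take_succ_cons]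
              · rw [show pvStepA top_n (PySem.Dict.mk [("top", t), ("jungle", j), ("mid", m), ("bot", b), ("support", s)]) rec = PySem.Dict.mk [("top", t), ("jungle", j), ("mid", m), ("bot", b), ("support", s)] from by
                  simp [pvStepA, hr, hr0, h3, pvRoles, hc, PySem.Dict.getD, PySem.Dict.get?], ih]
                have h0 : top_n.toNat - m.length = 0 := by omega
                simp [List.filter_cons, hm0, hm1, hm2, hm3, hm4, h0]
            ·
              by_cases h4 : PySem.Str.lower r = "bot"
              · have hm0 : pvMatches "top" rec = false := by simp [pvMatches, hr, h4, hr0]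
                have hm1 : pvMatches "jungle" rec = false := by simp [pvMatches, hr, h4, hr0]
                have hm2 : pvMatches "mid" rec = false := by simp [pvMatches, hr, h4, hr0]
                have hm3 : pvMatches "bot" rec = true := by simp [pvMatches, hr, h4, hr0]
                have hm4 : pvMatches "support" rec = false := by simp [pvMatches, hr, h4, hr0]
                by_cases hc : (((b.length : Nat) : Int)) < top_n
                · rw [show pvStepA top_n (PySem.Dict.mk [("top", t), ("jungle", j), ("mid", m), ("bot", b), ("support", s)]) rec = PySem.Dict.mk [("top", t), ("jungle", j), ("mid", m), ("bot", b ++ [rec]), ("support", s)] from by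
                    simp [pvStepA, hr, hr0, h4, pvRoles, hc, PySem.Dict.modify, PySem.Dict.getD, PySem.Dict.get?, PySem.Dict.insert], ih]
                  simp [List.filter_cons, hm0, hm1, hm2, hm3, hm4]
                  rw [show top_n.toNat - b.length = (top_n.toNat - (b.length + 1)) + 1 from by omega, List.take_succ_cons]
                · rw [show pvStepA top_n (PySem.Dict.mk [("top", t), ("jungle", j), ("mid", m), ("bot", b), ("support", s)]) rec = PySem.Dict.mk [("top", t), ("jungle", j), ("mid", m), ("bot", b), ("support", s)] from by
                    simp [pvStepA, hr, hr0, h4, pvRoles, hc, PySem.Dict.getD, PySem.Dict.get?], ih]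
                  have h0 : top_n.toNat - b.length = 0 := by omega
                  simp [List.filter_cons, hm0, hm1, hm2, hm3, hm4, h0]
              ·
                by_cases h5 : PySem.Str.lower r = "support"
                · have hm0 : pvMatches "top" rec = false := by simp [pvMatches, hr, h5, hr0]
                  have hm1 : pvMatches "jungle" rec = false := by simp [pvMatches, hr, h5, hr0]
                  have hm2 : pvMatches "mid" rec = false := by simp [pvMatches, hr, h5, hr0]
                  have hm3 : pvMatches "bot" rec = false := by simp [pvMatches, hr, h5, hr0]
                  have hm4 : pvMatches "support" rec = true := by simp [pvMatches, hr, h5, hr0]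
                  by_cases hc : (((s.length : Nat) : Int)) < top_n
                  · rw [show pvStepA top_n (PySem.Dict.mk [("top", t), ("jungle", j), ("mid", m), ("bot", b), ("support", s)]) rec = PySem.Dict.mk [("top", t), ("jungle", j), ("mid", m), ("bot", b), ("support", s ++ [rec])] from by
                      simp [pvStepA, hr, hr0, h5, pvRoles, hc, PySem.Dict.modify, PySem.Dict.getD, PySem.Dict.get?, PySem.Dict.insert], ih]
                    simp [List.filter_cons, hm0, hm1, hm2, hm3, hm4]
                    rw [show top_n.toNat - s.length = (top_n.toNat - (s.length + 1)) + 1 from by omega, List.take_succ_cons]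
                  · rw [show pvStepA top_n (PySem.Dict.mk [("top", t), ("jungle", j), ("mid", m), ("bot", b), ("support", s)]) rec = PySem.Dict.mk [("top", t), ("jungle", j), ("mid", m), ("bot", b), ("support", s)] from by
                      simp [pvStepA, hr, hr0, h5, pvRoles, hc, PySem.Dict.getD, PySem.Dict.get?], ih]
                    have h0 : top_n.toNat - s.length = 0 := by omega
                    simp [List.filter_cons, hm0, hm1, hm2, hm3, hm4, h0]
                · have hguard : PySem.Str.lower r ∉ pvRoles := by
                    simp [pvRoles, h1, h2, h3, h4, h5]
                  rw [show pvStepA top_n (PySem.Dict.mk [("top", t), ("jungle", j), ("mid", m), ("bot", b), ("support", s)]) rec = PySem.Dict.mk [("top", t), ("jungle", j), ("mid", m), ("bot", b), ("support", s)] from by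
                    simp [pvStepA, hr, hguard], ih]
                  simp [pvMatches, hr, h1, h2, h3, h4, h5]
theorem get_role_grouped_recommendations_spec : Claim_equal_get_role_grouped_recommendations := by
  intro picks top_n _
  unfold Spec_get_role_grouped_recommendations
  unfold get_role_grouped_recommendations get_role_grouped_recommendations_alt
  have hinit : pvRoles.foldl (fun d role => d.insert role []) PySem.Dict.empty
      = PySem.Dict.mk [("top", ([] : List (List (String × String)))), ("jungle", []), ("mid", []), ("bot", []), ("support", [])] := by
    decide
  simp only [hinit, pv_fold_inv]
  have hmax : (max top_n 0).toNat = top_n.toNat := by omega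
  simp [pvRoles, PySem.Dict.items, hmax]
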